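-- pv_equiv track=rewrite | github.com/tytac116/PropMatch | Backend/scrapers/enhanced_property24_scraper.py | extract_pets_allowed
-- ===== SOURCE A (Python) =====
-- from typing import List, Dict, Any, Optional
--
-- def extract_pets_allowed(markdown_content: str) -> Optional[bool]:
--     """Extract pets allowed information from Property Overview"""
--     lines = markdown_content.split('\n')
--
--     for i, line in enumerate(lines):
--         if line.strip() == "Pets Allowed":
--             # Look in next few lines for the value
--             for j in range(i+1, min(i+4, len(lines))):
--                 value_line = lines[j].strip().lower()
--                 if value_line in ['yes', 'no']:
--                     return value_line == 'yes'
--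
--     return None
-- ===== SOURCE B (Python) =====
-- from typing import Optional
--
-- def extract_pets_allowed(markdown_content: str) -> Optional[bool]:
--     """Extract pets allowed information from Property Overview (single pass)."""
--     remaining = 0
--     for line in markdown_content.split('\n'):
--         stripped = line.strip()
--         value = stripped.lower()
--         if remaining > 0 and value in ('yes', 'no'):
--             return value == 'yes'
--         if stripped == "Pets Allowed":
--             remaining = 3
--         else:
--             remaining = max(0, remaining - 1)
--     return None
-- ===== Notes on version B (the rewrite author's own statement) =====
-- stated objective: alternative
-- what changed: Replaces the outer label scan with an inner 3-line window re-scan by a single pass over the lines that keeps a countdown of how many lines remain inside the last label's window.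
import Mathlib
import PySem

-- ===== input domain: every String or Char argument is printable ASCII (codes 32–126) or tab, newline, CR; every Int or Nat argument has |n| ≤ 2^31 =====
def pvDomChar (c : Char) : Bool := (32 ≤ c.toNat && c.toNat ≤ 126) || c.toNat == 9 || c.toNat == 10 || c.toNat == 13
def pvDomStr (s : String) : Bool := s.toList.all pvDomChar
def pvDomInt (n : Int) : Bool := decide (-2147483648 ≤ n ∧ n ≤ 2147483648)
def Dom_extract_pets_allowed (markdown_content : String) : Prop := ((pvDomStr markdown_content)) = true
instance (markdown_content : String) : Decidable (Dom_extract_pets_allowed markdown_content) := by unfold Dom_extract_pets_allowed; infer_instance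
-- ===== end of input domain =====

-- B replaces A's label-scan-plus-3-line-window-rescan with one pass keeping a countdown; same return value (no side effects involved).

-- ===== PORT A =====
-- inner loop: for j in range(i+1, min(i+4, len(lines))): check lines[j].strip().lower() in ['yes','no']
def pvInnerScan : List String → Option Bool
  | [] => none
  | l :: ls =>
    let v := PySem.Str.lower (PySem.Str.strip l)
    if v == "yes" || v == "no" then some (v == "yes") else pvInnerScan ls

-- outer loop over the lines; the window lines[i+1 : min(i+4, len)] is the (up to) 3-element take of the remaining suffix
def pvLoopA : List String → Option Bool
  | [] => none
  | l :: ls =>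
    if PySem.Str.strip l == "Pets Allowed" then
      match pvInnerScan (ls.take 3) with
      | some b => some b
      | none => pvLoopA ls
    else pvLoopA ls

def extract_pets_allowed (markdown_content : String) : Option Bool :=
  pvLoopA ((PySem.Str.split? markdown_content "\n").getD [])

-- ===== PORT B =====
-- single pass with a countdown `remaining`; Nat subtraction is Python's max(0, remaining - 1)
def pvLoopB : List String → Nat → Option Bool
  | [], _ => none
  | l :: ls, remaining =>
    let s := PySem.Str.strip l
    let v := PySem.Str.lower s
    if remaining > 0 && (v == "yes" || v == "no") then some (v == "yes")
    else if s == "Pets Allowed" then pvLoopB ls 3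
    else pvLoopB ls (remaining - 1)

def extract_pets_allowed_alt (markdown_content : String) : Option Bool :=
  pvLoopB ((PySem.Str.split? markdown_content "\n").getD []) 0

-- ===== PRECONDITION & SPEC =====
def Spec_extract_pets_allowed (markdown_content : String) (out : Option Bool) : Prop := out = extract_pets_allowed_alt markdown_content
instance (markdown_content : String) (out : Option Bool) : Decidable (Spec_extract_pets_allowed markdown_content out) := by unfold Spec_extract_pets_allowed; infer_instance

-- ===== CLAIM (what is proved, stated in full; the proofs are below) =====
def Claim_equal_extract_pets_allowed : Prop := ∀ (markdown_content : String), Dom_extract_pets_allowed markdown_content → Spec_extract_pets_allowed markdown_content (extract_pets_allowed markdown_content)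

-- ===== LEMMAS AND PROOFS =====

-- the first yes/no in a prefix is also the first yes/no in any longer prefix
theorem pvInnerScan_take_mono (ls : List String) :
    ∀ (m n : Nat), m ≤ n → ∀ b, pvInnerScan (ls.take m) = some b → pvInnerScan (ls.take n) = some b := by
  induction ls with
  | nil => intro m n _ b h; simp [pvInnerScan] at h
  | cons l ls ih =>
    intro m n hmn b h
    cases m with
    | zero => simp [pvInnerScan] at h
    | succ k =>
      cases n with
      | zero => omega
      | succ j =>
        simp only [List.take_succ_cons, pvInnerScan] at h ⊢
        by_cases hyn : (PySem.Str.lower (PySem.Str.strip l) == "yes"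
            || PySem.Str.lower (PySem.Str.strip l) == "no") = true
        · simpa [hyn] using h
        · simp only [hyn, if_neg, Bool.false_eq_true, not_false_iff] at h ⊢
          exact ih k j (by omega) b h

-- invariant: B with `remaining` pending window slots equals "first yes/no in the pending window, else A on the whole suffix"
theorem pvLoopB_eq (ls : List String) :
    ∀ (r : Nat), r ≤ 3 →
      pvLoopB ls r = (match pvInnerScan (ls.take r) with
                      | some b => some b
                      | none => pvLoopA ls) := by
  induction ls with
  | nil => intro r _; cases h : pvInnerScan (([] : List String).take r) <;> simp [pvLoopB, pvLoopA, pvInnerScan] at h ⊢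
  | cons l ls ih =>
    intro r hr
    by_cases hlab : (PySem.Str.strip l == "Pets Allowed") = true
    · -- label line: B resets to 3; the label itself is never "yes"/"no"
      have hs : PySem.Str.strip l = "Pets Allowed" := by
        simpa using hlab
      have hv : (PySem.Str.lower (PySem.Str.strip l) == "yes"
          || PySem.Str.lower (PySem.Str.strip l) == "no") = false := by
        rw [hs]; decide
      have hB : pvLoopB (l :: ls) r = pvLoopB ls 3 := by
        simp [pvLoopB, hv, hlab]
      rw [hB, ih 3 (by omega)]
      cases r with
      | zero =>
        simp only [List.take_zero, pvInnerScan, pvLoopA, hlab, if_true]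
      | succ k =>
        simp only [List.take_succ_cons, pvInnerScan, hv, Bool.false_eq_true, if_false]
        cases hk : pvInnerScan (ls.take k) with
        | some b =>
          have h3 : pvInnerScan (ls.take 3) = some b :=
            pvInnerScan_take_mono ls k 3 (by omega) b hk
          simp [h3]
        | none => simp [pvLoopA, hlab]
    · -- ordinary line
      by_cases hyn : (PySem.Str.lower (PySem.Str.strip l) == "yes"
          || PySem.Str.lower (PySem.Str.strip l) == "no") = true
      · cases r with
        | zero =>
          have hB : pvLoopB (l :: ls) 0 = pvLoopB ls 0 := by
            simp [pvLoopB, hlab]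
          rw [hB, ih 0 (by omega)]
          simp [pvInnerScan, pvLoopA, hlab]
        | succ k =>
          have hB : pvLoopB (l :: ls) (k + 1)
              = some (PySem.Str.lower (PySem.Str.strip l) == "yes") := by
            simp [pvLoopB, hyn]
          rw [hB]
          simp [pvInnerScan, hyn]
      · have hB : pvLoopB (l :: ls) r = pvLoopB ls (r - 1) := by
          cases r <;> simp [pvLoopB, hyn, hlab]
        rw [hB, ih (r - 1) (by omega)]
        cases r with
        | zero => simp [pvInnerScan, pvLoopA, hlab]
        | succ k =>
          simp only [List.take_succ_cons, pvInnerScan, hyn, Bool.false_eq_true, if_false,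
            Nat.add_sub_cancel, pvLoopA, hlab, Bool.false_eq_true, if_false]

-- ===== VERDICT (by name: the statement is the Claim_ definition above) =====
theorem extract_pets_allowed_spec : Claim_equal_extract_pets_allowed := by
  intro md _
  unfold Spec_extract_pets_allowed extract_pets_allowed extract_pets_allowed_alt
  rw [pvLoopB_eq _ 0 (by omega)]
  simp [pvInnerScan]
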